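-- pv_equiv track=rewrite | github.com/jzamponi/utils | sphng2polaris.py | create_convex_hull_list
-- ===== SOURCE A (Python) =====
-- from collections import defaultdict
--
-- def create_convex_hull_list(hull):
--     neighbors = defaultdict(set)
--
--     for simplex in hull:
--         for idx in simplex:
--             other = set(simplex)
--             other.remove(idx)
--             neighbors[0] = neighbors[0].union(other)
--
--     return sorted(list(neighbors[0]))
-- ===== SOURCE B (Python) =====
-- def create_convex_hull_list(hull):
--     # A hull vertex is any index that shares a simplex with at least one other index.
--     return sorted({v for simplex in hull for v in simplex
--                    if any(w != v for w in simplex)})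
-- ===== Notes on version B (the rewrite author's own statement) =====
-- stated objective: faster
-- what changed: One set comprehension collecting every vertex that shares a simplex with a different vertex, sorted once, instead of rebuilding set(simplex), removing one element and re-unioning a growing set for every vertex of every simplex.
import Mathlib
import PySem

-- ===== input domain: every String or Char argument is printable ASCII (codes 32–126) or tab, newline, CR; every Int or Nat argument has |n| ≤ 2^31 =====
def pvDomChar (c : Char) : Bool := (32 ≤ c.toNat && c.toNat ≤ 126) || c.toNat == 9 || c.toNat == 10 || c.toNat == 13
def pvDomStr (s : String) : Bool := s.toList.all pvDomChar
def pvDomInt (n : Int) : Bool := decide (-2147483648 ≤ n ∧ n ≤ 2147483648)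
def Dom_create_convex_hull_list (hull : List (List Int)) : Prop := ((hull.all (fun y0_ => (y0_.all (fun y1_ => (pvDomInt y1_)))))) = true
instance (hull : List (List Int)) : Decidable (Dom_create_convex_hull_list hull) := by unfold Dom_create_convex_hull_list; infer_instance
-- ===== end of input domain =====

-- B collects with one set comprehension the vertices that share a simplex with a different vertex,
-- and sorts once, instead of A's per-vertex set rebuild/remove/union into a dict entry.

-- ===== PORT A =====
def create_convex_hull_list (hull : List (List Int)) : List Int :=
  let neighbors : PySem.Dict Int (PySem.Set Int) :=
    hull.foldl (fun d simplex =>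
      simplex.foldl (fun d idx =>
        -- other = set(simplex); other.remove(idx): idx ∈ simplex, so remove never raises and
        -- equals discard exactly here
        let other := PySem.Set.discard (PySem.Set.ofList simplex) idx
        d.insert 0 (PySem.Set.union (d.getD 0 PySem.Set.empty) other)) d)
      PySem.Dict.empty
  PySem.List.sorted (neighbors.getD 0 PySem.Set.empty) (fun x => x) false

-- ===== PORT B =====
def create_convex_hull_list_alt (hull : List (List Int)) : List Int :=
  PySem.List.sorted
    (PySem.Set.ofList
      (hull.flatMap (fun simplex =>
        simplex.filter (fun v => simplex.any (fun w => decide (w ≠ v))))))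
    (fun x => x) false

-- ===== PRECONDITION & SPEC =====
def Spec_create_convex_hull_list (hull : List (List Int)) (out : List Int) : Prop := out = create_convex_hull_list_alt hull
instance (hull : List (List Int)) (out : List Int) : Decidable (Spec_create_convex_hull_list hull out) := by unfold Spec_create_convex_hull_list; infer_instance

-- ===== CLAIM (what is proved, stated in full; the proofs are below) =====
def Claim_equal_create_convex_hull_list : Prop := ∀ (hull : List (List Int)), Dom_create_convex_hull_list hull → Spec_create_convex_hull_list hull (create_convex_hull_list hull)

-- ===== LEMMAS AND PROOFS =====

-- A's dict only ever touches key 0; its value evolves like a plain set accumulator.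
theorem pvA_inner_getD (l : List Int) (vs : PySem.Set Int) (d : PySem.Dict Int (PySem.Set Int)) :
    (l.foldl (fun d idx =>
        d.insert 0 (PySem.Set.union (d.getD 0 PySem.Set.empty)
          (PySem.Set.discard vs idx))) d).getD 0 PySem.Set.empty
    = l.foldl (fun s idx =>
        PySem.Set.union s (PySem.Set.discard vs idx))
        (d.getD 0 PySem.Set.empty) := by
  induction l generalizing d with
  | nil => rfl
  | cons i t ih =>
      simp only [List.foldl_cons]
      rw [ih, PySem.Dict.getD_insert_self]

theorem pvA_outer_getD (hull : List (List Int)) (d : PySem.Dict Int (PySem.Set Int)) :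
    (hull.foldl (fun d simplex =>
        simplex.foldl (fun d idx =>
          d.insert 0 (PySem.Set.union (d.getD 0 PySem.Set.empty)
            (PySem.Set.discard (PySem.Set.ofList simplex) idx))) d) d).getD 0 PySem.Set.empty
    = hull.foldl (fun s simplex =>
        simplex.foldl (fun s idx =>
          PySem.Set.union s (PySem.Set.discard (PySem.Set.ofList simplex) idx)) s)
        (d.getD 0 PySem.Set.empty) := by
  induction hull generalizing d with
  | nil => rfl
  | cons simplex t ih =>
      simp only [List.foldl_cons]
      rw [ih, pvA_inner_getD]

theorem pvA_inner_mem (simplex : List Int) (vs s : PySem.Set Int) (x : Int) :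
    (x ∈ simplex.foldl (fun s idx => PySem.Set.union s (PySem.Set.discard vs idx)) s)
    ↔ x ∈ s ∨ ∃ i ∈ simplex, x ∈ vs ∧ x ≠ i := by
  induction simplex generalizing s with
  | nil => simp
  | cons i t ih =>
      simp only [List.foldl_cons, ih, PySem.Set.mem_union, PySem.Set.mem_discard,
        List.mem_cons]
      constructor
      · rintro ((h | ⟨hv, hne⟩) | ⟨j, hj, hv, hne⟩)
        · exact Or.inl h
        · exact Or.inr ⟨i, Or.inl rfl, hv, hne⟩
        · exact Or.inr ⟨j, Or.inr hj, hv, hne⟩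
      · rintro (h | ⟨j, (rfl | hj), hv, hne⟩)
        · exact Or.inl (Or.inl h)
        · exact Or.inl (Or.inr ⟨hv, hne⟩)
        · exact Or.inr ⟨j, hj, hv, hne⟩

theorem pvA_inner_nodup (simplex : List Int) (vs s : PySem.Set Int) (h : s.Nodup) :
    (simplex.foldl (fun s idx => PySem.Set.union s (PySem.Set.discard vs idx)) s).Nodup := by
  induction simplex generalizing s with
  | nil => exact h
  | cons i t ih => exact ih _ (PySem.Set.nodup_union _ _ h)

theorem pvA_fold_mem (hull : List (List Int)) (s : PySem.Set Int) (x : Int) :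
    (x ∈ hull.foldl (fun s simplex =>
        simplex.foldl (fun s idx =>
          PySem.Set.union s (PySem.Set.discard (PySem.Set.ofList simplex) idx)) s) s)
    ↔ x ∈ s ∨ ∃ simplex ∈ hull, ∃ i ∈ simplex, x ∈ PySem.Set.ofList simplex ∧ x ≠ i := by
  induction hull generalizing s with
  | nil => simp
  | cons sp t ih =>
      simp only [List.foldl_cons, ih, pvA_inner_mem, List.mem_cons]
      constructor
      · rintro ((h | h) | ⟨sp', hsp', h⟩)
        · exact Or.inl h
        · exact Or.inr ⟨sp, Or.inl rfl, h⟩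
        · exact Or.inr ⟨sp', Or.inr hsp', h⟩
      · rintro (h | ⟨sp', (rfl | hsp'), h⟩)
        · exact Or.inl (Or.inl h)
        · exact Or.inl (Or.inr h)
        · exact Or.inr ⟨sp', hsp', h⟩

theorem pvA_fold_nodup (hull : List (List Int)) (s : PySem.Set Int) (h : s.Nodup) :
    (hull.foldl (fun s simplex =>
        simplex.foldl (fun s idx =>
          PySem.Set.union s (PySem.Set.discard (PySem.Set.ofList simplex) idx)) s) s).Nodup := by
  induction hull generalizing s with
  | nil => exact h
  | cons sp t ih => exact ih _ (pvA_inner_nodup _ _ _ h)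

-- one simplex's contribution in A, restated as "x is in the simplex next to a different vertex"
theorem pv_simplex_cond (simplex : List Int) (x : Int) :
    (∃ i ∈ simplex, x ∈ PySem.Set.ofList simplex ∧ x ≠ i)
    ↔ (x ∈ simplex ∧ ∃ w ∈ simplex, w ≠ x) := by
  simp only [PySem.Set.mem_ofList]
  constructor
  · rintro ⟨i, hi, hx, hne⟩
    exact ⟨hx, i, hi, fun h => hne h.symm⟩
  · rintro ⟨hx, w, hw, hne⟩
    exact ⟨w, hw, hx, fun h => hne h.symm⟩

-- ===== VERDICT (by name: the statement is the Claim_ definition above) =====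
theorem create_convex_hull_list_spec : Claim_equal_create_convex_hull_list := by
  intro hull _
  unfold Spec_create_convex_hull_list create_convex_hull_list create_convex_hull_list_alt
  simp only
  rw [pvA_outer_getD, PySem.Dict.getD_empty]
  apply PySem.List.sorted_eq_sorted_of_perm _ _ _ (fun a b h => h)
  rw [List.perm_ext_iff_of_nodup
    (pvA_fold_nodup hull PySem.Set.empty (by simp [PySem.Set.empty]))
    (PySem.Set.nodup_ofList _)]
  intro x
  rw [pvA_fold_mem, PySem.Set.mem_ofList]
  simp only [PySem.Set.empty, List.not_mem_nil, false_or, List.mem_flatMap,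
    List.mem_filter, List.any_eq_true, decide_eq_true_eq]
  constructor
  · rintro ⟨sp, hsp, h⟩
    obtain ⟨hx, hw⟩ := (pv_simplex_cond sp x).mp h
    exact ⟨sp, hsp, hx, hw⟩
  · rintro ⟨sp, hsp, hx, hw⟩
    exact ⟨sp, hsp, (pv_simplex_cond sp x).mpr ⟨hx, hw⟩⟩
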